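-- pv_equiv track=rewrite | github.com/ierodiak/Capstone-pipeline | utils/helpers.py | chunk_text_by_sentences
-- ===== SOURCE A (Python) =====
-- from typing import Dict, List, Any
--
-- def chunk_text_by_sentences(text: str, sentences_per_chunk: int = 5) -> List[str]:
--     """Alternative chunking method by sentences"""
--     sentences = text.split('. ')
--     chunks = []
--
--     for i in range(0, len(sentences), sentences_per_chunk):
--         chunk = '. '.join(sentences[i:i + sentences_per_chunk])
--         if chunk:
--             chunks.append(chunk + '.')
--
--     return chunks
-- ===== SOURCE B (Python) =====
-- from typing import List
--
-- def chunk_text_by_sentences(text: str, sentences_per_chunk: int = 5) -> List[str]: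
--     """Single-pass accumulator chunking: walk the sentences once, flushing the buffer each time it fills."""
--     def flush(chunks, buf):
--         joined = '. '.join(buf)
--         if joined:
--             chunks.append(joined + '.')
--
--     chunks: List[str] = []
--     buf: List[str] = []
--     for sentence in text.split('. '):
--         buf.append(sentence)
--         if len(buf) == sentences_per_chunk:
--             flush(chunks, buf)
--             buf = []
--     if buf:
--         flush(chunks, buf)
--     return chunks
-- ===== Notes on version B (the rewrite author's own statement) =====
-- stated objective: alternative
-- what changed: Replaced A's stride-indexed range(0, n, k) loop with per-group slicing and joining by a single pass over the sentence list that maintains a running buffer and flushes it each time it fills (and once at the end).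
-- outside the precondition, e.g. on chunk_text_by_sentences('a. b', -1): A returns [], B returns ['a. b.']
import Mathlib
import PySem

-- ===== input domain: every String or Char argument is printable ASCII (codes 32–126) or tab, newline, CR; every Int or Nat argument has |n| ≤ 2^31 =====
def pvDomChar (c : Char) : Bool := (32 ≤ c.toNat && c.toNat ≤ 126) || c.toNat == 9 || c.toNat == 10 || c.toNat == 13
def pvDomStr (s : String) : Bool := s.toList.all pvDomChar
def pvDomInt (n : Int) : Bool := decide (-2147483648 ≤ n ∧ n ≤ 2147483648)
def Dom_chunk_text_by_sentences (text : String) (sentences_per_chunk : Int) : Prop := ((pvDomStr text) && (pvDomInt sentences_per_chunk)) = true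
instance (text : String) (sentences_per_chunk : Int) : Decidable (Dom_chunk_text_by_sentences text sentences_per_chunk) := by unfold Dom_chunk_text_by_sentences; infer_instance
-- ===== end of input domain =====

-- B replaces A's stride-indexed range/slice loop by a single pass over the sentence list with a
-- running buffer that is flushed whenever it fills (objective: alternative decomposition, same cost).

-- text.split('. '), with the always-nonempty literal separator (split? is none only for sep = "")
def pvSplitDot (s : String) : List String :=
  match PySem.Str.split? s ". " with
  | some parts => parts
  | none => []

-- ===== PORT A =====
def chunk_text_by_sentences (text : String) (sentences_per_chunk : Int) : List String :=
  let sentences := pvSplitDot text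
  (PySem.List.pyRange 0 (sentences.length : Int) sentences_per_chunk).foldl
    (fun chunks i =>
      let chunk := PySem.Str.join ". "
        (PySem.List.slice sentences (some i) (some (i + sentences_per_chunk)))
      if chunk ≠ "" then chunks ++ [chunk ++ "."] else chunks)
    []

-- ===== PORT B =====
-- the local helper 'flush' of Source B
def pvFlush (chunks : List String) (buf : List String) : List String :=
  let joined := PySem.Str.join ". " buf
  if joined ≠ "" then chunks ++ [joined ++ "."] else chunks

def chunk_text_by_sentences_alt (text : String) (sentences_per_chunk : Int) : List String :=
  let st := (pvSplitDot text).foldl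
    (fun (st : List String × List String) sentence =>
      let buf := st.2 ++ [sentence]
      if (buf.length : Int) = sentences_per_chunk then (pvFlush st.1 buf, []) else (st.1, buf))
    ([], [])
  if st.2 ≠ [] then pvFlush st.1 st.2 else st.1

-- ===== PRECONDITION & SPEC =====
-- Pre_ excludes non-positive chunk sizes: at 0 A raises ValueError (range() step 0), and at negative
-- sizes A's [] is an accident of range()'s negative-step semantics while B's accumulator never
-- flushes mid-pass and emits the whole text — a corner no caller would specify.
def Pre_chunk_text_by_sentences (text : String) (sentences_per_chunk : Int) : Prop :=
  1 ≤ sentences_per_chunk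
instance (text : String) (sentences_per_chunk : Int) : Decidable (Pre_chunk_text_by_sentences text sentences_per_chunk) := by unfold Pre_chunk_text_by_sentences; infer_instance

def pvWitness_chunk_text_by_sentences : String × Int := ("Ab. cd. ef", 2)

def Spec_chunk_text_by_sentences (text : String) (sentences_per_chunk : Int) (out : List String) : Prop := out = chunk_text_by_sentences_alt text sentences_per_chunk
instance (text : String) (sentences_per_chunk : Int) (out : List String) : Decidable (Spec_chunk_text_by_sentences text sentences_per_chunk out) := by unfold Spec_chunk_text_by_sentences; infer_instance

-- ===== CLAIM (what is proved, stated in full; the proofs are below) =====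
def Claim_equal_chunk_text_by_sentences : Prop := ∀ (text : String) (sentences_per_chunk : Int), Dom_chunk_text_by_sentences text sentences_per_chunk → Pre_chunk_text_by_sentences text sentences_per_chunk → Spec_chunk_text_by_sentences text sentences_per_chunk (chunk_text_by_sentences text sentences_per_chunk)


-- ===== LEMMAS AND PROOFS =====

-- the value a group of sentences contributes to the output ([] when the joined string is empty)
def pvEmit (g : List String) : List String :=
  let joined := PySem.Str.join ". " g
  if joined ≠ "" then [joined ++ "."] else []

-- reference chunking: consecutive blocks of kn sentences, each contributing pvEmit of itself
def pvChk (kn : Nat) : List String → List String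
  | [] => []
  | x :: xs => pvEmit (x :: xs.take (kn - 1)) ++ pvChk kn (xs.drop (kn - 1))
  termination_by l => l.length
  decreasing_by simp

lemma pvChk_nil (kn : Nat) : pvChk kn [] = [] := by rw [pvChk.eq_def]

lemma pvChk_eq (kn : Nat) (hk : 1 ≤ kn) (l : List String) (hl : l ≠ []) :
    pvChk kn l = pvEmit (l.take kn) ++ pvChk kn (l.drop kn) := by
  cases l with
  | nil => exact absurd rfl hl
  | cons x xs =>
      rw [pvChk.eq_def]
      obtain ⟨m, rfl⟩ : ∃ m, kn = m + 1 := ⟨kn - 1, by omega⟩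
      simp

lemma pvFlush_eq (chunks buf : List String) : pvFlush chunks buf = chunks ++ pvEmit buf := by
  simp only [pvFlush, pvEmit]
  split_ifs <;> simp

lemma pyRange_nil_of_pos {a b s : Int} (hs : 0 < s) (h : b ≤ a) :
    PySem.List.pyRange a b s = [] := by
  rw [PySem.List.pyRange_of_pos _ _ hs, if_neg (by omega)]
  simp

lemma pyRange_cons_of_pos {a b s : Int} (hs : 0 < s) (h : a < b) :
    PySem.List.pyRange a b s = a :: PySem.List.pyRange (a + s) b s := by
  rw [PySem.List.pyRange_of_pos _ _ hs, PySem.List.pyRange_of_pos _ _ hs, if_pos h]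
  have e1 : b - (a + s) + s - 1 = b - a - 1 := by ring
  rw [e1]
  have key : (b - a + s - 1) / s = (b - a - 1) / s + 1 := by
    have e : b - a + s - 1 = (b - a - 1) + 1 * s := by ring
    rw [e, Int.add_mul_ediv_right _ _ (by omega)]
  have hnn : 0 ≤ (b - a - 1) / s := Int.ediv_nonneg (by omega) (by omega)
  have ht : ((b - a - 1) / s + 1).toNat = ((b - a - 1) / s).toNat + 1 := by omega
  rw [key, ht, List.range_succ_eq_map, List.map_cons, List.map_map]
  by_cases hb : a + s < b
  · rw [if_pos hb]
    congr 1
    · simp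
    · apply List.map_congr_left
      intro k _
      simp only [Function.comp_apply]
      push_cast
      ring
  · rw [if_neg hb]
    have h0 : (b - a - 1) / s = 0 := Int.ediv_eq_zero_of_lt (by omega) (by omega)
    simp [h0]

-- A's fold, started at index j, produces the reference chunking of the remaining sentences
lemma pvA_main (full : List String) (kn : Nat) (hk : 1 ≤ kn) :
    ∀ (j : Nat) (acc : List String),
      (PySem.List.pyRange (j : Int) (full.length : Int) (kn : Int)).foldl
        (fun chunks i =>
          let chunk := PySem.Str.join ". "
            (PySem.List.slice full (some i) (some (i + (kn : Int))))
          if chunk ≠ "" then chunks ++ [chunk ++ "."] else chunks)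
        acc = acc ++ pvChk kn (full.drop j) := by
  intro j
  induction hj : full.length - j using Nat.strong_induction_on generalizing j with
  | _ m ih =>
    intro acc
    by_cases hlt : j < full.length
    · have hcast : ((j : Int) + (kn : Int)) = ((j + kn : Nat) : Int) := by push_cast; ring
      have hne : full.drop j ≠ [] := by
        intro hnil
        have := congrArg List.length hnil
        simp at this
        omega
      rw [pyRange_cons_of_pos (by exact_mod_cast hk) (by exact_mod_cast hlt), List.foldl_cons]
      rw [PySem.List.slice_natCast_add full j kn, hcast]
      rw [ih (full.length - (j + kn)) (by omega) (j + kn) rfl]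
      rw [pvChk_eq kn hk (full.drop j) hne, List.drop_drop]
      simp only [pvEmit]
      split_ifs <;> simp
    · rw [pyRange_nil_of_pos (by exact_mod_cast hk)
          (by exact_mod_cast (by omega : full.length ≤ j))]
      rw [List.drop_eq_nil_of_le (by omega)]
      simp [pvChk_nil]

-- B's fold with a partially filled buffer, followed by the final flush, produces the reference
-- chunking of buffer ++ remaining sentences
lemma pvB_main (kn : Nat) (hk : 1 ≤ kn) :
    ∀ (l : List String) (chunks buf : List String), buf.length < kn →
      (let st := l.foldl
        (fun (st : List String × List String) sentence =>
          let buf := st.2 ++ [sentence]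
          if (buf.length : Int) = (kn : Int) then (pvFlush st.1 buf, []) else (st.1, buf))
        (chunks, buf)
       if st.2 ≠ [] then pvFlush st.1 st.2 else st.1) = chunks ++ pvChk kn (buf ++ l) := by
  intro l
  induction l with
  | nil =>
    intro chunks buf hbuf
    cases buf with
    | nil => simp [pvChk_nil]
    | cons x xs =>
      simp only [List.foldl_nil, List.append_nil]
      rw [if_pos (by simp), pvFlush_eq]
      rw [pvChk_eq kn hk _ (by simp)]
      have h1 : (x :: xs).take kn = x :: xs := List.take_of_length_le (Nat.le_of_lt hbuf)
      have h2 : (x :: xs).drop kn = [] := List.drop_eq_nil_of_le (Nat.le_of_lt hbuf)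
      rw [h1, h2, pvChk_nil]
      simp
  | cons s rest ih =>
    intro chunks buf hbuf
    simp only [List.foldl_cons]
    by_cases hfill : ((buf ++ [s]).length : Int) = (kn : Int)
    · rw [if_pos hfill, pvFlush_eq]
      have hlen : (buf ++ [s]).length = kn := by exact_mod_cast hfill
      have h2 := ih (chunks ++ pvEmit (buf ++ [s])) []
        (by simp only [List.length_nil]; omega)
      simp only [List.nil_append] at h2
      rw [h2]
      rw [show buf ++ s :: rest = (buf ++ [s]) ++ rest by simp]
      rw [pvChk_eq kn hk ((buf ++ [s]) ++ rest) (by simp)]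
      rw [List.take_append_of_le_length (by omega), List.take_of_length_le (by omega)]
      rw [List.drop_append_of_le_length (by omega), List.drop_eq_nil_of_le (by omega)]
      simp
    · rw [if_neg hfill]
      have hlt : (buf ++ [s]).length < kn := by
        have hle : (buf ++ [s]).length ≤ kn := by
          simp only [List.length_append, List.length_cons, List.length_nil] at *
          omega
        have hne : (buf ++ [s]).length ≠ kn := fun h => hfill (by exact_mod_cast h)
        omega
      rw [ih chunks (buf ++ [s]) hlt]
      simp

-- ===== VERDICT (by name: the statement is the Claim_ definition above) =====
theorem chunk_text_by_sentences_spec : Claim_equal_chunk_text_by_sentences := by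
  intro text k _ hpre
  unfold Spec_chunk_text_by_sentences chunk_text_by_sentences chunk_text_by_sentences_alt
  have hk1 : 1 ≤ k := hpre
  have hkcast : ((k.toNat : Nat) : Int) = k := by omega
  have hknge : 1 ≤ k.toNat := by omega
  rw [← hkcast]
  have hA := pvA_main (pvSplitDot text) k.toNat hknge 0 []
  have hB := pvB_main k.toNat hknge (pvSplitDot text) [] []
    (by simp only [List.length_nil]; omega)
  simp only [Nat.cast_zero, List.drop_zero, List.nil_append] at hA hB
  rw [hA, hB]
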